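-- pv_equiv track=rewrite | github.com/eliottcassidy2000/math | 04-computation/n9_threebythree_creative.py | count_disjoint_triples
-- ===== SOURCE A (Python) =====
-- def count_disjoint_triples(cycles_list):
--     count = 0
--     for i in range(len(cycles_list)):
--         for j in range(i+1, len(cycles_list)):
--             if len(cycles_list[i] & cycles_list[j]) > 0:
--                 continue
--             for k in range(j+1, len(cycles_list)):
--                 if len(cycles_list[i] & cycles_list[k]) == 0 and len(cycles_list[j] & cycles_list[k]) == 0:
--                     count += 1
--     return count
-- ===== SOURCE B (Python) =====
-- def count_disjoint_triples(cycles_list):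
--     n = len(cycles_list)
--     # build the disjointness graph once (forward edges only), then count triangles
--     adj = []
--     for i in range(n):
--         si = cycles_list[i]
--         adj.append([j for j in range(i + 1, n) if si.isdisjoint(cycles_list[j])])
--     total = 0
--     for i in range(n):
--         ai = set(adj[i])
--         for j in adj[i]:
--             for k in adj[j]:
--                 if k in ai:
--                     total += 1
--     return total
-- ===== Notes on version B (the rewrite author's own statement) =====
-- stated objective: faster
-- what changed: B computes each pair's disjointness once to build a forward-adjacency graph, then counts triangles by scanning adjacency lists with a set membership test, instead of A's triple nested index loop that re-runs set intersections for every (i,j,k).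
import Mathlib
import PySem

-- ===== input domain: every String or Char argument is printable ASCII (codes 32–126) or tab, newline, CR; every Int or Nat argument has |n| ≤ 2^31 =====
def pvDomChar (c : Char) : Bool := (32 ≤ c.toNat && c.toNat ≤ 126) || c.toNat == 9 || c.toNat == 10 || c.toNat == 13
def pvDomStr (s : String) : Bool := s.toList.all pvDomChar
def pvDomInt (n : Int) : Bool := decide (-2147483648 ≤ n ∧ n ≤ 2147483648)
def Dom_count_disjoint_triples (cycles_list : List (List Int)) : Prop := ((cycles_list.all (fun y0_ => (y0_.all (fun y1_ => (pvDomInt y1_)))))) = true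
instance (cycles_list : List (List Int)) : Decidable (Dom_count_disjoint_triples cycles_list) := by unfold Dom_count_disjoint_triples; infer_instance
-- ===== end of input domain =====

-- B builds the pairwise-disjointness graph once and counts triangles over its adjacency
-- lists, instead of re-testing set intersections inside a triple nested index loop (faster).

-- ===== PORT A =====
-- len(s & t) for the Python sets made from the two lists
def pvInterLen (a b : List Int) : Int :=
  PySem.Set.len (PySem.Set.inter (PySem.Set.ofList a) b)

def count_disjoint_triples (cycles_list : List (List Int)) : Int :=
  (PySem.List.pyRange 0 (cycles_list.length : Int) 1).foldl (fun count i =>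
    (PySem.List.pyRange (i + 1) (cycles_list.length : Int) 1).foldl (fun count j =>
      if 0 < pvInterLen (PySem.List.pyGetD cycles_list i []) (PySem.List.pyGetD cycles_list j []) then
        count
      else
        (PySem.List.pyRange (j + 1) (cycles_list.length : Int) 1).foldl (fun count k =>
          if pvInterLen (PySem.List.pyGetD cycles_list i []) (PySem.List.pyGetD cycles_list k []) = 0 ∧
             pvInterLen (PySem.List.pyGetD cycles_list j []) (PySem.List.pyGetD cycles_list k []) = 0 then
            count + 1
          else count) count) count) 0

-- ===== PORT B =====
-- s.isdisjoint(t) for the Python sets made from the two lists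
def pvDisjoint (a b : List Int) : Bool :=
  PySem.Set.isdisjoint (PySem.Set.ofList a) b

def count_disjoint_triples_alt (cycles_list : List (List Int)) : Int :=
  let n : Int := cycles_list.length
  let adj : List (List Int) :=
    (PySem.List.pyRange 0 n 1).foldl (fun acc i =>
      acc ++ [(PySem.List.pyRange (i + 1) n 1).filter
        (fun j => pvDisjoint (PySem.List.pyGetD cycles_list i []) (PySem.List.pyGetD cycles_list j []))]) []
  (PySem.List.pyRange 0 n 1).foldl (fun total i =>
    let ai : PySem.Set Int := PySem.Set.ofList (PySem.List.pyGetD adj i [])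
    (PySem.List.pyGetD adj i []).foldl (fun total j =>
      (PySem.List.pyGetD adj j []).foldl (fun total k =>
        if PySem.Set.contains ai k then total + 1 else total) total) total) 0

-- ===== PRECONDITION & SPEC =====
def Spec_count_disjoint_triples (cycles_list : List (List Int)) (out : Int) : Prop := out = count_disjoint_triples_alt cycles_list
instance (cycles_list : List (List Int)) (out : Int) : Decidable (Spec_count_disjoint_triples cycles_list out) := by unfold Spec_count_disjoint_triples; infer_instance

-- ===== CLAIM (what is proved, stated in full; the proofs are below) =====
def Claim_equal_count_disjoint_triples : Prop := ∀ (cycles_list : List (List Int)), Dom_count_disjoint_triples cycles_list → Spec_count_disjoint_triples cycles_list (count_disjoint_triples cycles_list)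

-- ===== LEMMAS AND PROOFS =====

-- abbreviations used only by the proofs: the disjointness test, B's adjacency row,
-- and A's innermost sum
def pvG (cl : List (List Int)) (i j : Int) : Bool :=
  pvDisjoint (PySem.List.pyGetD cl i []) (PySem.List.pyGetD cl j [])

def pvAdjF (cl : List (List Int)) (i : Int) : List Int :=
  (PySem.List.pyRange (i + 1) (cl.length : Int) 1).filter (fun j => pvG cl i j)

def pvInner (cl : List (List Int)) (i j : Int) : Int :=
  ((PySem.List.pyRange (j + 1) (cl.length : Int) 1).map
    (fun k => if pvG cl i k && pvG cl j k then (1 : Int) else 0)).sum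

lemma pvInterLen_eq_zero_iff (a b : List Int) :
    pvInterLen a b = 0 ↔ pvDisjoint a b = true := by
  simp [pvInterLen, pvDisjoint, PySem.Set.len, PySem.Set.inter, PySem.Set.isdisjoint,
    List.length_eq_zero_iff, List.filter_eq_nil_iff]

lemma pvInterLen_pos_iff (a b : List Int) :
    0 < pvInterLen a b ↔ pvDisjoint a b = false := by
  have h0 : 0 ≤ pvInterLen a b := by simp [pvInterLen, PySem.Set.len]
  rw [← Bool.not_eq_true, ← pvInterLen_eq_zero_iff]
  omega

-- a counting foldl is the starting value plus a sum (function may be rewritten under a membership hypothesis)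
lemma pvFoldl_add_mem (l : List Int) (f : Int → Int → Int) (g : Int → Int)
    (h : ∀ c x, x ∈ l → f c x = c + g x) (c : Int) :
    l.foldl f c = c + (l.map g).sum := by
  induction l generalizing c with
  | nil => simp
  | cons x xs ih =>
      simp only [List.foldl_cons, List.map_cons, List.sum_cons]
      rw [h c x (by simp), ih (fun c y hy => h c y (by simp [hy]))]
      ring

lemma pvSum_filter (l : List Int) (p : Int → Bool) (f : Int → Int) :
    ((l.filter p).map f).sum = (l.map (fun x => if p x then f x else 0)).sum := by
  induction l with
  | nil => rfl
  | cons x xs ih => by_cases h : p x <;> simp [h, ih]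

lemma pvSum_adjF (cl : List (List Int)) (i : Int) (F : Int → Int) :
    ((pvAdjF cl i).map F).sum =
      ((PySem.List.pyRange (i + 1) (cl.length : Int) 1).map
        (fun j => if pvG cl i j then F j else 0)).sum := by
  simp only [pvAdjF]
  rw [pvSum_filter]

lemma pvMem_adjF (cl : List (List Int)) (i j : Int) :
    j ∈ pvAdjF cl i ↔ (i + 1 ≤ j ∧ j < (cl.length : Int)) ∧ pvG cl i j = true := by
  simp [pvAdjF, List.mem_filter, PySem.List.mem_pyRange_one]

-- A's loops, as a sum over all index triples
lemma pvA_norm (cl : List (List Int)) :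
    count_disjoint_triples cl =
      ((PySem.List.pyRange 0 (cl.length : Int) 1).map (fun i =>
        ((PySem.List.pyRange (i + 1) (cl.length : Int) 1).map (fun j =>
          if pvG cl i j then pvInner cl i j else 0)).sum)).sum := by
  unfold count_disjoint_triples
  rw [pvFoldl_add_mem _ _ _ ?_ 0, zero_add]
  intro c i _
  rw [pvFoldl_add_mem _ _ _ ?_ c]
  intro c j _
  by_cases hg : pvG cl i j = true
  · rw [if_neg (by rw [pvInterLen_pos_iff]; simp [pvG] at hg; simp [hg])]
    rw [if_pos hg]
    rw [pvFoldl_add_mem _ _ _ ?_ c]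
    · rfl
    intro c k _
    by_cases h1 : (pvInterLen (PySem.List.pyGetD cl i []) (PySem.List.pyGetD cl k []) = 0 ∧
        pvInterLen (PySem.List.pyGetD cl j []) (PySem.List.pyGetD cl k []) = 0)
    · rw [if_pos h1, if_pos]
      rw [Bool.and_eq_true]
      exact ⟨(pvInterLen_eq_zero_iff _ _).mp h1.1, (pvInterLen_eq_zero_iff _ _).mp h1.2⟩
    · rw [if_neg h1, if_neg, add_zero]
      rw [Bool.and_eq_true]
      intro hc
      exact h1 ⟨(pvInterLen_eq_zero_iff _ _).mpr hc.1, (pvInterLen_eq_zero_iff _ _).mpr hc.2⟩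
  · rw [if_pos (by rw [pvInterLen_pos_iff]; simpa [pvG] using hg), if_neg hg, add_zero]

-- B's adjacency list indexed: row i is pvAdjF cl i
lemma pvAdj_get (cl : List (List Int)) (i : Int) (h0 : 0 ≤ i) (h1 : i < (cl.length : Int)) :
    PySem.List.pyGetD
      ((PySem.List.pyRange 0 (cl.length : Int) 1).foldl (fun acc i =>
        acc ++ [(PySem.List.pyRange (i + 1) (cl.length : Int) 1).filter
          (fun j => pvDisjoint (PySem.List.pyGetD cl i []) (PySem.List.pyGetD cl j []))]) []) i []
      = pvAdjF cl i := by
  rw [PySem.List.foldl_append_singleton_eq_map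
    (fun i => (PySem.List.pyRange (i + 1) (cl.length : Int) 1).filter
      (fun j => pvDisjoint (PySem.List.pyGetD cl i []) (PySem.List.pyGetD cl j []))), List.nil_append]
  rw [PySem.List.pyGetD_map_pyRange_of_nonneg _ _ _ _ h0 h1]
  rfl

-- B's loops, as a sum over the adjacency rows
lemma pvB_norm (cl : List (List Int)) :
    count_disjoint_triples_alt cl =
      ((PySem.List.pyRange 0 (cl.length : Int) 1).map (fun i =>
        ((pvAdjF cl i).map (fun j =>
          ((pvAdjF cl j).map (fun k =>
            if PySem.Set.contains (PySem.Set.ofList (pvAdjF cl i)) k then (1 : Int) else 0)).sum)).sum)).sum := by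
  unfold count_disjoint_triples_alt
  dsimp only
  rw [pvFoldl_add_mem _ _ _ ?_ 0, zero_add]
  intro c i hi
  obtain ⟨hi0, hin⟩ := PySem.List.mem_pyRange_one.mp hi
  rw [pvAdj_get cl i hi0 hin]
  rw [pvFoldl_add_mem _ _ _ ?_ c]
  intro c j hj
  obtain ⟨⟨hj0, hjn⟩, -⟩ := (pvMem_adjF cl i j).mp hj
  rw [pvAdj_get cl j (by omega) hjn]
  rw [pvFoldl_add_mem _ _ _ ?_ c]
  intro c k _
  split <;> simp

-- ===== VERDICT (by name: the statement is the Claim_ definition above) =====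
theorem count_disjoint_triples_spec : Claim_equal_count_disjoint_triples := by
  intro cl _
  unfold Spec_count_disjoint_triples
  rw [pvA_norm, pvB_norm]
  congr 1
  apply List.map_congr_left
  intro i hi
  obtain ⟨hi0, hin⟩ := PySem.List.mem_pyRange_one.mp hi
  rw [pvSum_adjF]
  apply congrArg
  apply List.map_congr_left
  intro j hj
  obtain ⟨hij, hjn⟩ := PySem.List.mem_pyRange_one.mp hj
  by_cases hg : pvG cl i j = true
  · rw [if_pos hg, if_pos hg, pvSum_adjF cl j]
    simp only [pvInner]
    apply congrArg
    apply List.map_congr_left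
    intro k hk
    obtain ⟨hjk, hkn⟩ := PySem.List.mem_pyRange_one.mp hk
    have hiff : PySem.Set.contains (PySem.Set.ofList (pvAdjF cl i)) k = true ↔ pvG cl i k = true := by
      rw [PySem.Set.contains_iff, PySem.Set.mem_ofList, pvMem_adjF]
      exact ⟨fun h => h.2, fun h => ⟨⟨by omega, by omega⟩, h⟩⟩
    have hc : PySem.Set.contains (PySem.Set.ofList (pvAdjF cl i)) k = pvG cl i k := by
      cases hA : PySem.Set.contains (PySem.Set.ofList (pvAdjF cl i)) k <;>
        cases hB : pvG cl i k <;> simp_all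
    rw [hc]
    cases pvG cl i k <;> cases pvG cl j k <;> simp
  · rw [if_neg hg, if_neg hg]
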